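-- pv_equiv track=rewrite | github.com/nosebleed-dfg/theory-of-everything | sha/machines/machine_fibonacci_sha.py | count_binary_carries
-- ===== SOURCE A (Python) =====
-- def count_binary_carries(a: int, b: int) -> int:
--     """Count the number of bit positions where adding a + b produces a carry.
--     This is the binary carry count for standard mod-2^32 addition."""
--     carry = 0
--     count = 0
--     for bit in range(32):
--         bit_a = (a >> bit) & 1
--         bit_b = (b >> bit) & 1
--         total = bit_a + bit_b + carry
--         carry = total >> 1
--         count += carry
--     return count
-- ===== SOURCE B (Python) =====
-- def count_binary_carries(a: int, b: int) -> int: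
--     """Carry count via the population-count identity:
--     popcount(A) + popcount(B) - popcount(A + B) equals the number of carries
--     produced when adding A and B, where A, B are the 32-bit values the loop
--     actually reads (the unmasked sum keeps the carry out of bit 31)."""
--     A = a & 0xFFFFFFFF
--     B = b & 0xFFFFFFFF
--     return bin(A).count('1') + bin(B).count('1') - bin(A + B).count('1')
-- ===== Notes on version B (the rewrite author's own statement) =====
-- stated objective: simpler
-- what changed: Replaced the 32-iteration bit-by-bit carry-propagation loop with the closed-form population-count identity popcount(A)+popcount(B)-popcount(A+B) on the 32-bit-masked operands (unmasked sum so the carry out of bit 31 is counted).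
import Mathlib
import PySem

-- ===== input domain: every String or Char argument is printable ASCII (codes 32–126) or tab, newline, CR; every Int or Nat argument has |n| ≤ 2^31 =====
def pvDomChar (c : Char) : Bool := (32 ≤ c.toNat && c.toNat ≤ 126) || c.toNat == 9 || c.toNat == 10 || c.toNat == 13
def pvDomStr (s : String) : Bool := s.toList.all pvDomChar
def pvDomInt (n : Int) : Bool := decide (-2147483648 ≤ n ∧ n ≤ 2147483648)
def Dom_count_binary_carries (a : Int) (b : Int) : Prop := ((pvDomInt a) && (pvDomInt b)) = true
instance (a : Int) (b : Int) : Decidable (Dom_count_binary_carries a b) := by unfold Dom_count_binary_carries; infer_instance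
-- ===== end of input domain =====

-- B replaces A's 32-step bit-by-bit carry-simulation loop with the closed-form
-- population-count identity popcount(A)+popcount(B)-popcount(A+B) on the masked
-- 32-bit operands (objective: simpler).

-- ===== PORT A =====
-- state of the loop: (carry, count)
def count_binary_carries (a : Int) (b : Int) : Int :=
  let r := (PySem.List.pyRange 0 32 1).foldl (fun (st : Int × Int) (bit : Int) =>
    let bit_a := PySem.Int.band (a >>> bit.toNat) 1
    let bit_b := PySem.Int.band (b >>> bit.toNat) 1
    let total := bit_a + bit_b + st.1
    let carry := total >>> (1 : Nat)
    (carry, st.2 + carry)) (0, 0)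
  r.2

-- ===== PORT B =====
-- bin(x).count('1') for a nonnegative x is the population count = x.bit_count() = PySem.Int.bitCount
def count_binary_carries_alt (a : Int) (b : Int) : Int :=
  let A := PySem.Int.band a 4294967295
  let B := PySem.Int.band b 4294967295
  ((PySem.Int.bitCount A : Int) + (PySem.Int.bitCount B : Int)) - (PySem.Int.bitCount (A + B) : Int)

-- ===== PRECONDITION & SPEC =====
def Spec_count_binary_carries (a : Int) (b : Int) (out : Int) : Prop := out = count_binary_carries_alt a b
instance (a : Int) (b : Int) (out : Int) : Decidable (Spec_count_binary_carries a b out) := by unfold Spec_count_binary_carries; infer_instance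

-- ===== CLAIM (what is proved, stated in full; the proofs are below) =====
def Claim_equal_count_binary_carries : Prop := ∀ (a : Int) (b : Int), Dom_count_binary_carries a b → Spec_count_binary_carries a b (count_binary_carries a b)

-- ===== LEMMAS AND PROOFS =====

-- Python's  a >> k  (Lean's Int.shiftRight) is floor division by 2^k.
theorem pvShiftRight_eq_ediv (a : Int) (k : Nat) : a >>> k = a / 2^k := by
  rcases a with n | n
  · show (Int.ofNat (n >>> k)) = _
    rw [Nat.shiftRight_eq_div_pow]
    simp
  · show (Int.negSucc (n >>> k)) = _
    rw [Nat.shiftRight_eq_div_pow, Int.negSucc_eq, Int.negSucc_eq]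
    have hm : (0:Int) < 2^k := by positivity
    obtain ⟨q, r, hr0, hrm, hqr⟩ : ∃ q r : Int, 0 ≤ r ∧ r < 2^k ∧ (n:Int) = q * 2^k + r :=
      ⟨(n:Int) / 2^k, (n:Int) % 2^k, Int.emod_nonneg _ hm.ne', Int.emod_lt_of_pos _ hm, by
        rw [mul_comm]; exact (Int.ediv_add_emod (n:Int) (2^k)).symm⟩
    have h1 : -((n:Int) + 1) = (2^k - 1 - r) + (-q - 1) * 2^k := by rw [hqr]; ring
    have hcast : ((n / 2^k : Nat) : Int) = (n:Int) / 2^k := Nat.ToInt.div_congr rfl rfl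
    have h2 : ((n / 2^k : Nat) : Int) = q := by
      rw [hcast, hqr, add_comm, Int.add_mul_ediv_right _ _ hm.ne', Int.ediv_eq_zero_of_lt hr0 hrm]
      omega
    rw [h1, Int.add_mul_ediv_right _ _ hm.ne', Int.ediv_eq_zero_of_lt (by omega) (by omega), h2]
    omega

-- the loop's bit extraction  (a >> k) & 1  is  (a / 2^k) % 2  (floor div, euclidean mod)
theorem pvBit_extract (a : Int) (k : Nat) : PySem.Int.band (a >>> k) 1 = (a / 2^k) % 2 := by
  rw [PySem.Int.band_one, PySem.Int.mod_eq_emod_of_pos (by omega), pvShiftRight_eq_ediv]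

-- Python's  a & 0xFFFFFFFF  is  a mod 2^32
theorem pvBand_mask (a : Int) : PySem.Int.band a 4294967295 = a % 4294967296 := by
  unfold PySem.Int.band
  have hmask : (4294967295 : Int).toNat = 2^32 - 1 := by decide
  by_cases h : 0 ≤ a
  · simp only [if_pos h, if_pos (show (0:Int) ≤ 4294967295 by norm_num)]
    have hand : a.toNat &&& (4294967295 : Int).toNat = a.toNat % 4294967296 := by
      rw [hmask, Nat.and_two_pow_sub_one_eq_mod]
    omega
  · simp only [if_neg h, if_pos (show (0:Int) ≤ 4294967295 by norm_num)]
    have hand : (4294967295 : Int).toNat &&& (-a - 1).toNat = (-a - 1).toNat % 4294967296 := by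
      rw [hmask, Nat.and_comm, Nat.and_two_pow_sub_one_eq_mod]
    omega

-- split lemma for popcount (Nat): low part below 2^n, high part shifted up
theorem pvPc_split (n : Nat) : ∀ s t : Nat, s < 2^n →
    PySem.Int.bitCount ((s + 2^n * t : Nat) : Int) =
      PySem.Int.bitCount (s : Int) + PySem.Int.bitCount (t : Int) := by
  induction n with
  | zero =>
    intro s t hs
    interval_cases s
    simp
  | succ n ih =>
    intro s t hs
    have hp : 2^(n+1) = 2^n * 2 := by ring
    rcases Nat.eq_zero_or_pos (s + 2^(n+1) * t) with h0 | h0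
    · have hs0 : s = 0 := by omega
      have ht0 : t = 0 := by
        rcases Nat.eq_zero_or_pos t with h | h
        · exact h
        · exfalso; nlinarith [Nat.one_le_two_pow (n := n+1)]
      subst hs0; subst ht0; simp
    · rw [PySem.Int.bitCount_natCast h0]
      have he1 : (s + 2^(n+1) * t) % 2 = s % 2 := by
        have : 2^(n+1) * t = 2 * (2^n * t) := by ring
        omega
      have he2 : (s + 2^(n+1) * t) / 2 = s / 2 + 2^n * t := by
        have : 2^(n+1) * t = 2 * (2^n * t) := by ring
        omega
      have hs2 : s / 2 < 2^n := by omega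
      rw [he1, he2, ih (s/2) t hs2]
      rcases Nat.eq_zero_or_pos s with h | h
      · subst h; simp
      · rw [PySem.Int.bitCount_natCast h]
        omega

-- Int version: 0 ≤ s < 2^n, 0 ≤ t
theorem pvPc_splitI (n : Nat) (s t : Int) (hs0 : 0 ≤ s) (hs : s < 2^n) (ht : 0 ≤ t) :
    PySem.Int.bitCount (s + 2^n * t) =
      PySem.Int.bitCount s + PySem.Int.bitCount t := by
  have hcast : ((2^n : Nat) : Int) = 2^n := by push_cast; ring
  have hsn : s.toNat < 2^n := by omega
  have h1 : s + 2^n * t = ((s.toNat + 2^n * t.toNat : Nat) : Int) := by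
    push_cast [Int.toNat_of_nonneg hs0, Int.toNat_of_nonneg ht]
    ring
  have h2 : s = ((s.toNat : Nat) : Int) := by omega
  have h3 : t = ((t.toNat : Nat) : Int) := by omega
  rw [h1, pvPc_split n s.toNat t.toNat hsn, ← h2, ← h3]

-- a mod 2^(n+1) decomposed into low n bits and bit n
theorem pvModStep (a : Int) (n : Nat) :
    a % 2^(n+1) = a % 2^n + 2^n * (a / 2^n % 2) := by
  have hP : (0:Int) < 2^n := by positivity
  have hp : (2:Int)^(n+1) = 2^n * 2 := by ring
  have hqr : 2^n * (a / 2^n) + a % 2^n = a := Int.mul_ediv_add_emod a (2^n)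
  have hr0 : 0 ≤ a % 2^n := Int.emod_nonneg a hP.ne'
  have hr1 : a % 2^n < 2^n := Int.emod_lt_of_pos a hP
  have hq2 : a / 2^n % 2 = 0 ∨ a / 2^n % 2 = 1 := by omega
  rcases hq2 with h | h <;> rw [hp, h]
  · have ha : a = a % 2^n + (2^n * 2) * (a / 2^n / 2) := by
      have h2 : a / 2^n = 2 * (a / 2^n / 2) := by omega
      linear_combination (2:Int)^n * h2 - hqr
    have : a % (2^n * 2) = a % 2^n := by
      conv_lhs => rw [ha]
      rw [Int.add_mul_emod_self_left, Int.emod_eq_of_lt hr0 (by omega)]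
    omega
  · have ha : a = (a % 2^n + 2^n) + (2^n * 2) * (a / 2^n / 2) := by
      have h2 : a / 2^n = 2 * (a / 2^n / 2) + 1 := by omega
      linear_combination (2:Int)^n * h2 - hqr
    have : a % (2^n * 2) = a % 2^n + 2^n := by
      conv_lhs => rw [ha]
      rw [Int.add_mul_emod_self_left, Int.emod_eq_of_lt (by omega) (by omega)]
    omega
 

theorem pvLoop (a b : Int) (n : Nat) :
    (PySem.List.pyRange 0 (n:Int) 1).foldl (fun (st : Int × Int) (bit : Int) =>
      let bit_a := PySem.Int.band (a >>> bit.toNat) 1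
      let bit_b := PySem.Int.band (b >>> bit.toNat) 1
      let total := bit_a + bit_b + st.1
      let carry := total >>> (1 : Nat)
      (carry, st.2 + carry)) (0, 0) =
    ((a % 2^n + b % 2^n) / 2^n,
     (PySem.Int.bitCount (a % 2^n) : Int) + (PySem.Int.bitCount (b % 2^n) : Int)
       - (PySem.Int.bitCount (a % 2^n + b % 2^n) : Int)) := by
  induction n with
  | zero =>
    norm_num [PySem.List.pyRange_one_eq_nil, Int.emod_one]
  | succ n ih =>
    have hP : (0:Int) < 2^n := by positivity
    have hp : (2:Int)^(n+1) = 2^n * 2 := by ring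
    have hcn : (((n:Nat) : Int) + 1) = (((n+1 : Nat)) : Int) := by push_cast; ring
    rw [← hcn, PySem.List.pyRange_one_succ_right (by positivity), List.foldl_append, ih]
    simp only [List.foldl_cons, List.foldl_nil, Int.toNat_natCast]
    rw [pvBit_extract a n, pvBit_extract b n, pvShiftRight_eq_ediv]
    simp only [pow_one]
    have hα01 : a / 2^n % 2 = 0 ∨ a / 2^n % 2 = 1 := by omega
    have hβ01 : b / 2^n % 2 = 0 ∨ b / 2^n % 2 = 1 := by omega
    have hra0 : 0 ≤ a % 2^n := Int.emod_nonneg a hP.ne'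
    have hra1 : a % 2^n < 2^n := Int.emod_lt_of_pos a hP
    have hrb0 : 0 ≤ b % 2^n := Int.emod_nonneg b hP.ne'
    have hrb1 : b % 2^n < 2^n := Int.emod_lt_of_pos b hP
    have hma := pvModStep a n
    have hmb := pvModStep b n
    have hc0 : 0 ≤ (a % 2^n + b % 2^n) / 2^n := Int.ediv_nonneg (by omega) hP.le
    have hc1 : (a % 2^n + b % 2^n) / 2^n ≤ 1 := by
      rw [Int.ediv_le_iff_le_mul hP]; omega
    have hw : 2^n * ((a % 2^n + b % 2^n) / 2^n) + (a % 2^n + b % 2^n) % 2^n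
        = a % 2^n + b % 2^n := Int.mul_ediv_add_emod _ _
    have hw0 : 0 ≤ (a % 2^n + b % 2^n) % 2^n := Int.emod_nonneg _ hP.ne'
    have hw1 : (a % 2^n + b % 2^n) % 2^n < 2^n := Int.emod_lt_of_pos _ hP
    have hsplit : a % 2^(n+1) + b % 2^(n+1) =
        (a % 2^n + b % 2^n) % 2^n
          + 2^n * ((a % 2^n + b % 2^n) / 2^n + a / 2^n % 2 + b / 2^n % 2) := by
      linear_combination hma + hmb - hw
    have hS : (a % 2^(n+1) + b % 2^(n+1)) / 2^(n+1) =
        ((a % 2^n + b % 2^n) / 2^n + a / 2^n % 2 + b / 2^n % 2) / 2 := by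
      rw [hsplit, hp, ← Int.ediv_ediv_eq_ediv_mul hP.le,
        Int.add_mul_ediv_left _ _ hP.ne', Int.ediv_eq_zero_of_lt hw0 hw1]
      omega
    have hpa : (PySem.Int.bitCount (a % 2^(n+1)) : Int)
        = (PySem.Int.bitCount (a % 2^n) : Int) + a / 2^n % 2 := by
      rw [hma, pvPc_splitI n _ _ hra0 hra1 (by omega)]
      rcases hα01 with h | h <;> rw [h] <;>
        push_cast [PySem.Int.bitCount_zero, show PySem.Int.bitCount (1:Int) = 1 from rfl] <;> ring
    have hpb : (PySem.Int.bitCount (b % 2^(n+1)) : Int)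
        = (PySem.Int.bitCount (b % 2^n) : Int) + b / 2^n % 2 := by
      rw [hmb, pvPc_splitI n _ _ hrb0 hrb1 (by omega)]
      rcases hβ01 with h | h <;> rw [h] <;>
        push_cast [PySem.Int.bitCount_zero, show PySem.Int.bitCount (1:Int) = 1 from rfl] <;> ring
    have hold : (PySem.Int.bitCount (a % 2^n + b % 2^n) : Int)
        = (PySem.Int.bitCount ((a % 2^n + b % 2^n) % 2^n) : Int)
          + (a % 2^n + b % 2^n) / 2^n := by
      conv_lhs => rw [show a % 2^n + b % 2^n = (a % 2^n + b % 2^n) % 2^n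
            + 2^n * ((a % 2^n + b % 2^n) / 2^n) from by linear_combination - hw]
      rw [pvPc_splitI n _ _ hw0 hw1 hc0]
      have : (a % 2^n + b % 2^n) / 2^n = 0 ∨ (a % 2^n + b % 2^n) / 2^n = 1 := by omega
      rcases this with h | h <;> rw [h] <;>
        push_cast [PySem.Int.bitCount_zero, show PySem.Int.bitCount (1:Int) = 1 from rfl] <;> ring
    have hnew : (PySem.Int.bitCount (a % 2^(n+1) + b % 2^(n+1)) : Int)
        = (PySem.Int.bitCount ((a % 2^n + b % 2^n) % 2^n) : Int)
          + ((a % 2^n + b % 2^n) / 2^n + a / 2^n % 2 + b / 2^n % 2)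
          - ((a % 2^n + b % 2^n) / 2^n + a / 2^n % 2 + b / 2^n % 2) / 2 := by
      rw [hsplit, pvPc_splitI n _ _ hw0 hw1 (by omega)]
      have hbT : (PySem.Int.bitCount ((a % 2^n + b % 2^n) / 2^n + a / 2^n % 2 + b / 2^n % 2) : Int)
          = ((a % 2^n + b % 2^n) / 2^n + a / 2^n % 2 + b / 2^n % 2)
            - ((a % 2^n + b % 2^n) / 2^n + a / 2^n % 2 + b / 2^n % 2) / 2 := by
        have h3 : (a % 2^n + b % 2^n) / 2^n = 0 ∨ (a % 2^n + b % 2^n) / 2^n = 1 := by omega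
        rcases h3 with h3 | h3 <;> rcases hα01 with h1 | h1 <;> rcases hβ01 with h2 | h2 <;>
          simp only [h3, h1, h2] <;> decide
      push_cast [hbT]
      ring
    simp only [Prod.mk.injEq]
    refine ⟨?_, ?_⟩
    · rw [hS]; omega
    · rw [hpa, hpb, hnew, hold]; omega

theorem pvMain (a b : Int) : count_binary_carries a b = count_binary_carries_alt a b := by
  unfold count_binary_carries count_binary_carries_alt
  have h := pvLoop a b 32
  simp only [show (((32:Nat)):Int) = 32 from by norm_num,
    show ((2:Int)^(32:Nat)) = 4294967296 from by norm_num] at h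
  rw [h, pvBand_mask, pvBand_mask]

theorem count_binary_carries_spec : Claim_equal_count_binary_carries := by
  intro a b _
  exact pvMain a b
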